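-- pv_equiv track=rewrite | github.com/vissesse/dev-loja | app_loja/normalizar.py | formatar_cpf
-- ===== SOURCE A (Python) =====
-- def formatar_cpf(cpf):
--     new_cpf = ''
--     i = 0
--     for n in cpf:
--         if i == 3 or i == 6:
--             new_cpf += '.'
--
--         if i == 9:
--             new_cpf += '-'
--
--         new_cpf += n
--         i += 1
--
--     return new_cpf
-- ===== SOURCE B (Python) =====
-- def formatar_cpf(cpf):
--     out = cpf[0:3]
--     if len(cpf) > 3:
--         out += '.' + cpf[3:6]
--     if len(cpf) > 6:
--         out += '.' + cpf[6:9]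
--     if len(cpf) > 9:
--         out += '-' + cpf[9:]
--     return out
-- ===== Notes on version B (the rewrite author's own statement) =====
-- stated objective: simpler
-- what changed: Replaces the per-character loop with a manual index counter by four guarded slice concatenations (cpf[0:3], '.'+cpf[3:6], '.'+cpf[6:9], '-'+cpf[9:]).
import Mathlib
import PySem

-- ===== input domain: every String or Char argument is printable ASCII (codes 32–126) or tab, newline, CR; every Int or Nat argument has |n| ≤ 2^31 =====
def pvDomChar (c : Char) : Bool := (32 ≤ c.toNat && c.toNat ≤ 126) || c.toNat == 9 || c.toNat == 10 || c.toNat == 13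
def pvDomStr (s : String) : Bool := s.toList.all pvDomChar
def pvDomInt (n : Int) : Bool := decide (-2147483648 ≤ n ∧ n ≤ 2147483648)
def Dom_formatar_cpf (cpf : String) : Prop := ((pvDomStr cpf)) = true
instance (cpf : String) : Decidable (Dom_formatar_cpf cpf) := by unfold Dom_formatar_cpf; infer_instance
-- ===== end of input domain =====

-- B replaces A's per-character loop (index counter, separator inserted before chars 3/6/9)
-- by four guarded slice concatenations; objective: simpler.


-- ===== PORT A =====
-- A's loop: for n in cpf, with counter i; '.' before i=3 and i=6, '-' before i=9.
def formatarLoopA : List Char → Nat → List Char → List Char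
  | [], _, acc => acc
  | n :: rest, i, acc =>
      formatarLoopA rest (i + 1)
        ((acc ++ (if i = 3 ∨ i = 6 then ['.'] else [])
              ++ (if i = 9 then ['-'] else [])) ++ [n])

def formatar_cpf (cpf : String) : String :=
  String.ofList (formatarLoopA cpf.toList 0 [])

-- ===== PORT B =====
-- B: out = cpf[0:3]; then guarded '.'+cpf[3:6], '.'+cpf[6:9], '-'+cpf[9:].
def formatar_cpf_alt (cpf : String) : String :=
  let t := cpf.toList
  let out := t.take 3
  let out := if 3 < t.length then out ++ '.' :: (t.drop 3).take 3 else out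
  let out := if 6 < t.length then out ++ '.' :: (t.drop 6).take 3 else out
  let out := if 9 < t.length then out ++ '-' :: t.drop 9 else out
  String.ofList out

-- ===== PRECONDITION & SPEC =====
def Spec_formatar_cpf (cpf : String) (out : String) : Prop := out = formatar_cpf_alt cpf
instance (cpf : String) (out : String) : Decidable (Spec_formatar_cpf cpf out) := by unfold Spec_formatar_cpf; infer_instance

-- ===== CLAIM (what is proved, stated in full; the proofs are below) =====
def Claim_equal_formatar_cpf : Prop := ∀ (cpf : String), Dom_formatar_cpf cpf → Spec_formatar_cpf cpf (formatar_cpf cpf)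

-- ===== LEMMAS AND PROOFS =====
-- After index 9 no separator is ever inserted: the loop just appends the rest.
theorem formatarLoopA_ge (l : List Char) (i : Nat) (acc : List Char) (h : 9 < i) :
    formatarLoopA l i acc = acc ++ l := by
  induction l generalizing i acc with
  | nil => simp [formatarLoopA]
  | cons n rest ih =>
      have h3 : ¬ (i = 3 ∨ i = 6) := by omega
      have h9 : i ≠ 9 := by omega
      simp [formatarLoopA, h3, h9, ih (i + 1) _ (by omega)]

theorem formatar_eq (l : List Char) :
    formatarLoopA l 0 [] =
      (let out := l.take 3
       let out := if 3 < l.length then out ++ '.' :: (l.drop 3).take 3 else out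
       let out := if 6 < l.length then out ++ '.' :: (l.drop 6).take 3 else out
       if 9 < l.length then out ++ '-' :: l.drop 9 else out) := by
  match l with
  | [] => simp [formatarLoopA]
  | [a] => simp [formatarLoopA]
  | [a,b] => simp [formatarLoopA]
  | [a,b,c] => simp [formatarLoopA]
  | [a,b,c,d] => simp [formatarLoopA]
  | [a,b,c,d,e] => simp [formatarLoopA]
  | [a,b,c,d,e,f] => simp [formatarLoopA]
  | [a,b,c,d,e,f,g] => simp [formatarLoopA]
  | [a,b,c,d,e,f,g,h] => simp [formatarLoopA]
  | [a,b,c,d,e,f,g,h,k] => simp [formatarLoopA]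
  | a::b::c::d::e::f::g::h::k::m::rest =>
      simp [formatarLoopA, formatarLoopA_ge rest 10 _ (by omega)]

-- ===== VERDICT (by name: the statement is the Claim_ definition above) =====
theorem formatar_cpf_spec : Claim_equal_formatar_cpf := by
  intro cpf _
  unfold Spec_formatar_cpf formatar_cpf formatar_cpf_alt
  rw [formatar_eq]
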